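-- pv_equiv track=rewrite | github.com/tessia-project/tessia-mesh | src/task_runner/machines/operations/s3270/wrapper.py | get_changed_rows
-- ===== SOURCE A (Python) =====
-- def get_changed_rows(origin: list, modified: list):
--     """
--     Get a slice of changed rows for first to last one
--     """
--     if len(modified) > len(origin):
--         ext_origin = origin + [' '] * (len(modified) - len(origin))
--     else:
--         ext_origin = origin
--     changed_offsets = list(
--         offset for offset, (org, tgt) in enumerate(zip(ext_origin, modified))
--         if org != tgt)
--
--     if not changed_offsets:
--         return []
--
--     return modified[changed_offsets[0]:changed_offsets[-1]+1]
-- ===== SOURCE B (Python) =====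
-- def get_changed_rows(origin: list, modified: list):
--     """
--     Get a slice of changed rows for first to last one
--     """
--     n = len(modified)
--
--     def cmp_row(i):
--         return origin[i] if i < len(origin) else ' '
--
--     first = 0
--     while first < n and cmp_row(first) == modified[first]:
--         first += 1
--     if first == n:
--         return []
--     last = n - 1
--     while cmp_row(last) == modified[last]:
--         last -= 1
--     return modified[first:last + 1]
-- ===== Notes on version B (the rewrite author's own statement) =====
-- stated objective: alternative
-- what changed: Instead of materialising the whole list of changed offsets via enumerate(zip(...)) over a padded copy of origin, B scans forward for the first differing row and backward for the last one (comparing row i against origin[i] or ' ' when origin is shorter) and slices between them, allocating no intermediate lists.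
import Mathlib
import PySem

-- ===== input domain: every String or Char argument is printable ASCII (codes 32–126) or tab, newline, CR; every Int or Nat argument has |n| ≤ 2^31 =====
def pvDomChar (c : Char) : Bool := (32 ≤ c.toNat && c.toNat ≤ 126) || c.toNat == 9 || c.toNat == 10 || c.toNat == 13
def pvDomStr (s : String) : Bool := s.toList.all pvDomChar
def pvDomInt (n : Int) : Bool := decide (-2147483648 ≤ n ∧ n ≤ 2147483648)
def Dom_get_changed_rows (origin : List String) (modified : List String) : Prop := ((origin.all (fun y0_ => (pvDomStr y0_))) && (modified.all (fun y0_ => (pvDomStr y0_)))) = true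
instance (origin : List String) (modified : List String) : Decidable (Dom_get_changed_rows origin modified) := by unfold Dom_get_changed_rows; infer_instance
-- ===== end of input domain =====

-- B replaces building the full list of changed offsets by two boundary scans
-- (forward for the first changed row, backward for the last); objective: alternative decomposition.

-- ===== PORT A =====
def get_changed_rows (origin : List String) (modified : List String) : List String :=
  let ext_origin :=
    if modified.length > origin.length then
      origin ++ List.replicate (modified.length - origin.length) " "
    else origin
  let changed_offsets :=
    ((PySem.List.enumerate (ext_origin.zip modified) 0).filter
      (fun p => p.2.1 != p.2.2)).map (fun p => p.1)
  match changed_offsets with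
  | [] => []
  | c0 :: _ =>
      -- changed_offsets[-1] (guarded by the nonemptiness check)
      PySem.List.slice modified (some c0)
        (some (PySem.List.pyGetD changed_offsets (-1) 0 + 1))

-- ===== PORT B =====
-- origin[i] if i < len(origin) else ' '
def cmpRow (origin : List String) (i : Nat) : String := origin[i]?.getD " "

-- while first < n and cmp_row(first) == modified[first]: first += 1  (none iff first reaches n)
def findFirstDiff (origin : List String) (modified : List String) (i : Nat) : Option Nat :=
  if i < modified.length then
    if cmpRow origin i = modified[i]?.getD " " then findFirstDiff origin modified (i + 1)
    else some i
  else none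
termination_by modified.length - i

-- while cmp_row(last) == modified[last]: last -= 1  (only called when a diff at some j ≤ i exists)
def findLastDiff (origin : List String) (modified : List String) : Nat → Nat
  | 0 => 0
  | i + 1 =>
      if cmpRow origin (i + 1) = modified[i + 1]?.getD " " then findLastDiff origin modified i
      else i + 1

def get_changed_rows_alt (origin : List String) (modified : List String) : List String :=
  match findFirstDiff origin modified 0 with
  | none => []
  | some first =>
      let last := findLastDiff origin modified (modified.length - 1)
      PySem.List.slice modified (some (first : Int)) (some ((last : Int) + 1))

-- ===== PRECONDITION & SPEC =====
def Spec_get_changed_rows (origin : List String) (modified : List String) (out : List String) : Prop := out = get_changed_rows_alt origin modified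
instance (origin : List String) (modified : List String) (out : List String) : Decidable (Spec_get_changed_rows origin modified out) := by unfold Spec_get_changed_rows; infer_instance

-- ===== CLAIM (what is proved, stated in full; the proofs are below) =====
def Claim_equal_get_changed_rows : Prop := ∀ (origin : List String) (modified : List String), Dom_get_changed_rows origin modified → Spec_get_changed_rows origin modified (get_changed_rows origin modified)

-- ===== LEMMAS AND PROOFS =====

-- the row-difference test both programs apply at index i
def diffAt (origin : List String) (modified : List String) (i : Nat) : Bool :=
  cmpRow origin i != modified[i]?.getD " "

theorem zip_ext_eq (origin modified : List String) :
    ((if modified.length > origin.length then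
        origin ++ List.replicate (modified.length - origin.length) " "
      else origin).zip modified) =
    (List.range modified.length).map
      (fun i => (cmpRow origin i, modified[i]?.getD " ")) := by
  apply List.ext_getElem
  · by_cases h : modified.length > origin.length <;> simp [h] <;> omega
  · intro i h1 h2
    have hi : i < modified.length := by
      by_cases h : modified.length > origin.length <;> simp [h] at h1 <;> omega
    rw [List.getElem_zip]
    simp only [List.getElem_map, List.getElem_range]
    apply Prod.ext
    · show _ = cmpRow origin i
      by_cases hg : modified.length > origin.length
      · simp only [hg, if_true]
        by_cases ho : i < origin.length
        · rw [List.getElem_append_left ho]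
          simp [cmpRow, List.getElem?_eq_getElem ho]
        · rw [List.getElem_append_right (by omega)]
          simp [cmpRow, List.getElem?_eq_none (by omega : origin.length ≤ i)]
      · have ho : i < origin.length := by omega
        simp only [hg, if_false]
        simp [cmpRow, List.getElem?_eq_getElem ho]
    · show modified[i] = _
      simp [List.getElem?_eq_getElem hi]

theorem enumerate_map_lemma {α β : Type} (g : α → β) (l : List α) (s : Int) :
    PySem.List.enumerate (l.map g) s = (PySem.List.enumerate l s).map (fun p => (p.1, g p.2)) := by
  induction l generalizing s with
  | nil => simp [PySem.List.enumerate_nil]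
  | cons x xs ih => simp [PySem.List.enumerate_cons, ih]

theorem enumerate_range (n : Nat) :
    PySem.List.enumerate (List.range n) 0 = (List.range n).map (fun i : Nat => ((i : Int), i)) := by
  apply List.ext_getElem?
  intro k
  rw [PySem.List.getElem?_enumerate]
  by_cases hk : k < n
  · simp [hk]
  · simp [hk]

-- A's changed_offsets list is the filtered range, cast to Int
theorem changed_offsets_eq (origin modified : List String) :
    ((PySem.List.enumerate
        ((if modified.length > origin.length then
            origin ++ List.replicate (modified.length - origin.length) " "
          else origin).zip modified) 0).filter
      (fun p => p.2.1 != p.2.2)).map (fun p => p.1) =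
    ((List.range modified.length).filter (diffAt origin modified)).map (fun i : Nat => (i : Int)) := by
  rw [zip_ext_eq, enumerate_map_lemma, enumerate_range, List.map_map, List.filter_map,
    List.map_map]
  simp only [Function.comp_def]
  rfl

-- findFirstDiff computes the head of the filtered range
theorem findFirstDiff_eq (origin modified : List String) (i : Nat) :
    findFirstDiff origin modified i =
      ((List.range' i (modified.length - i)).filter (diffAt origin modified)).head? := by
  generalize hk : modified.length - i = k
  induction k generalizing i with
  | zero =>
    rw [findFirstDiff]
    have h : ¬ i < modified.length := by omega
    simp [h]
  | succ k ih =>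
    have hi : i < modified.length := by omega
    rw [findFirstDiff, List.range'_succ, List.filter_cons]
    by_cases hc : cmpRow origin i = modified[i]?.getD " "
    · have hd : diffAt origin modified i = false := by simp [diffAt, hc]
      simp only [hi, if_true, hc, hd, Bool.false_eq_true, if_false]
      exact ih (i + 1) (by omega)
    · have hd : diffAt origin modified i = true := by simp [diffAt, hc]
      have hc' : ¬ cmpRow origin i = modified[i] := by
        simpa [List.getElem?_eq_getElem hi] using hc
      simp [hi, hc', hd]

-- findLastDiff computes the last of the filtered range (when it is nonempty)
theorem findLastDiff_eq (origin modified : List String) (i : Nat)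
    (h : ((List.range (i + 1)).filter (diffAt origin modified)) ≠ []) :
    ((List.range (i + 1)).filter (diffAt origin modified)).getLast? =
      some (findLastDiff origin modified i) := by
  induction i with
  | zero =>
    cases hq : diffAt origin modified 0 with
    | false => simp [List.range_succ, hq] at h
    | true => simp [List.range_succ, hq, findLastDiff]
  | succ i ih =>
    rw [List.range_succ, List.filter_append] at h ⊢
    cases hq : diffAt origin modified (i + 1) with
    | false =>
      have hc : cmpRow origin (i + 1) = modified[i + 1]?.getD " " := by
        simpa [diffAt] using hq
      simp only [hq, List.filter_cons, Bool.false_eq_true, if_false, List.filter_nil,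
        List.append_nil] at h ⊢
      rw [findLastDiff]
      simp only [hc, if_true]
      exact ih h
    | true =>
      have hc : ¬ cmpRow origin (i + 1) = modified[i + 1]?.getD " " := by
        simpa [diffAt] using hq
      rw [findLastDiff]
      simp [hq, hc]

-- ===== VERDICT (by name: the statement is the Claim_ definition above) =====
theorem get_changed_rows_spec : Claim_equal_get_changed_rows := by
  intro origin modified _
  show get_changed_rows origin modified = get_changed_rows_alt origin modified
  unfold get_changed_rows get_changed_rows_alt
  simp only [changed_offsets_eq]
  rw [findFirstDiff_eq]
  have hr0 : List.range' 0 (modified.length - 0) = List.range modified.length := by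
    simpa using (List.range_eq_range' (n := modified.length)).symm
  rw [hr0]
  cases hF : (List.range modified.length).filter (diffAt origin modified) with
  | nil => simp
  | cons f t =>
    simp only [List.map_cons, List.head?_cons]
    -- nonempty: lengths positive
    have hfmem : f ∈ (List.range modified.length).filter (diffAt origin modified) := by
      rw [hF]; exact List.mem_cons_self ..
    have hfn : f < modified.length := by
      have := List.mem_filter.mp hfmem |>.1
      simpa [List.mem_range] using this
    have hn : 0 < modified.length := by omega
    have hne : (List.range modified.length).filter (diffAt origin modified) ≠ [] := by
      rw [hF]; simp
    have hlast := findLastDiff_eq origin modified (modified.length - 1)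
      (by rw [Nat.sub_add_cancel hn]; exact hne)
    rw [Nat.sub_add_cancel hn] at hlast
    -- relate pyGetD (-1) to findLastDiff
    have hmapne : ((f :: t).map (fun i : Nat => (i : Int))) ≠ [] := by simp
    have hlast2 : ((f :: t).map (fun i : Nat => (i : Int))).getLast? =
        some ((findLastDiff origin modified (modified.length - 1) : Int)) := by
      rw [← hF, List.getLast?_map, hlast]
      rfl
    have hpg : PySem.List.pyGetD ((f :: t).map (fun i : Nat => (i : Int))) (-1) 0 =
        (findLastDiff origin modified (modified.length - 1) : Int) := by
      rw [PySem.List.pyGetD_neg_one (h := hmapne)]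
      have hgl := List.getLast?_eq_some_getLast (l := (f :: t).map (fun i : Nat => (i : Int))) hmapne
      rw [hgl] at hlast2
      injection hlast2
    rw [List.map_cons] at hpg
    rw [hpg]
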